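-- pv_equiv track=rewrite | github.com/bubpen/codekata | 프로그래머스/2/87390. n＾2 배열 자르기/n＾2 배열 자르기.py | solution
-- ===== SOURCE A (Python) =====
-- def solution(n, left, right):
--     answer = []
--     i = left // n
--     j = left % n
--     while len(answer) < right-left +1:
--         answer.append(max(i+1,j+1))
--         j += 1
--         if j == n:
--             i+=1
--             j = 0
--     return answer
-- ===== SOURCE B (Python) =====
-- def solution(n, left, right):
--     # Row-wise: row i of the n*n grid is (i+1 repeated i+1 times) then i+2, ..., n.
--     # Emit each row's clipped window as one segment instead of walking element by element.
--     answer = []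
--     first, last = left // n, right // n
--     for i in range(first, last + 1):
--         lo = left % n if i == first else 0
--         hi = right % n if i == last else n - 1
--         flat_end = min(hi, i)
--         if lo <= flat_end:
--             answer += [i + 1] * (flat_end - lo + 1)
--         run_start = max(lo, i + 1)
--         answer += range(run_start + 1, hi + 2)
--     return answer
-- ===== Notes on version B (the rewrite author's own statement) =====
-- stated objective: alternative
-- what changed: Replaces A's element-by-element walk with per-element max() by a row-wise decomposition: each grid row i is the constant i+1 up to column i followed by the run i+2..n, so B emits each row's clipped window as one repeated block plus one range segment, O(rows) segment operations instead of O(length) max computations.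
-- outside the precondition, e.g. on solution(0, 0, 0): A raises ZeroDivisionError, B raises ZeroDivisionError; on solution(-2, 0, 3): A returns [1, 2, 3, 4], B returns []
import Mathlib
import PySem

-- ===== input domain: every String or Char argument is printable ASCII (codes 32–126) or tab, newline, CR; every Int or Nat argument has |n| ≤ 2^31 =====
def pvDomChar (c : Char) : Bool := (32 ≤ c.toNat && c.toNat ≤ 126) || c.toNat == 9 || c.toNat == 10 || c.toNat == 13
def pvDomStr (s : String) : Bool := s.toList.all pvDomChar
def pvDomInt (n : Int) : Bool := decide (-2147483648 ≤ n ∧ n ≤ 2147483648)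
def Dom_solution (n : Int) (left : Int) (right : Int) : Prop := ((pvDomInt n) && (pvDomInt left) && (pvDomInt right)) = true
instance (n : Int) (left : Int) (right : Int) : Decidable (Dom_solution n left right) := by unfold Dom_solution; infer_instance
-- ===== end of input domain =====

-- B replaces A's element-by-element walk by a row-wise decomposition (constant block + increasing run per row), an alternative algorithm of the same cost.


-- ===== PORT A =====
-- A's while loop: fuel = number of elements still to append; state (i, j) with manual wraparound.
def solutionGo (n : Int) : Nat → Int → Int → List Int
  | 0, _, _ => []
  | Nat.succ m, i, j =>
      max (i + 1) (j + 1) ::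
        (if j + 1 = n then solutionGo n m (i + 1) 0 else solutionGo n m i (j + 1))

def solution (n : Int) (left : Int) (right : Int) : List Int :=
  solutionGo n (right - left + 1).toNat (PySem.Int.floordiv left n) (PySem.Int.mod left n)

-- ===== PORT B =====
-- One row's clipped window: the constant block [i+1] * (flat_end - lo + 1) plus the run range(run_start+1, hi+2).
def rowSeg (i : Int) (lo : Int) (hi : Int) : List Int :=
  (if lo ≤ min hi i then PySem.List.pyRepeat [i + 1] (min hi i - lo + 1) else []) ++
    PySem.List.pyRange (max lo (i + 1) + 1) (hi + 2) 1

def solution_alt (n : Int) (left : Int) (right : Int) : List Int :=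
  let first := PySem.Int.floordiv left n
  let last := PySem.Int.floordiv right n
  (PySem.List.pyRange first (last + 1) 1).foldl
    (fun acc i =>
      acc ++ rowSeg i
        (if i = first then PySem.Int.mod left n else 0)
        (if i = last then PySem.Int.mod right n else n - 1)) []

-- ===== PRECONDITION & SPEC =====
-- Pre_ restricts to the task's natural domain n ≥ 1 (the side of the n×n array): n = 0 raises
-- ZeroDivisionError in A, and for negative n A's 'j == n' wraparound never fires, an artefact of the loop.
def Pre_solution (n : Int) (left : Int) (right : Int) : Prop := 1 ≤ n
instance (n : Int) (left : Int) (right : Int) : Decidable (Pre_solution n left right) := by unfold Pre_solution; infer_instance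
def pvWitness_solution : Int × Int × Int := (3, 2, 5)

def Spec_solution (n : Int) (left : Int) (right : Int) (out : List Int) : Prop := out = solution_alt n left right
instance (n : Int) (left : Int) (right : Int) (out : List Int) : Decidable (Spec_solution n left right out) := by unfold Spec_solution; infer_instance

-- ===== CLAIM (what is proved, stated in full; the proofs are below) =====
def Claim_equal_solution : Prop := ∀ (n : Int) (left : Int) (right : Int), Dom_solution n left right → Pre_solution n left right → Spec_solution n left right (solution n left right)

-- ===== LEMMAS AND PROOFS =====

-- The flat value at index k: both ports are proved equal to (pyRange left (right+1)).map (pvF n).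
def pvF (n : Int) (k : Int) : Int :=
  max (PySem.Int.floordiv k n) (PySem.Int.mod k n) + 1

-- One loop step of A: incrementing j with wraparound at n moves (l//n, l%n) to ((l+1)//n, (l+1)%n).
lemma step_eq (n l : Int) (hn : 1 ≤ n) :
    (if PySem.Int.mod l n + 1 = n
      then (PySem.Int.floordiv l n + 1, (0 : Int))
      else (PySem.Int.floordiv l n, PySem.Int.mod l n + 1))
      = (PySem.Int.floordiv (l + 1) n, PySem.Int.mod (l + 1) n) := by
  have hn' : (0 : Int) < n := hn
  rw [PySem.Int.floordiv_eq_ediv_of_pos hn', PySem.Int.floordiv_eq_ediv_of_pos hn',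
      PySem.Int.mod_eq_emod_of_pos hn', PySem.Int.mod_eq_emod_of_pos hn']
  have h1 : l % n + n * (l / n) = l := by
    have := Int.ediv_add_emod l n; omega
  have h2 : 0 ≤ l % n := Int.emod_nonneg l (by omega)
  have h3 : l % n < n := Int.emod_lt_of_pos l hn'
  split_ifs with h
  · have : (l + 1) / n = l / n + 1 ∧ (l + 1) % n = 0 := by
      have hmul : n * (l / n + 1) = n * (l / n) + n := by ring
      rw [Int.ediv_emod_unique hn']; omega
    simp [this.1, this.2]
  · have : (l + 1) / n = l / n ∧ (l + 1) % n = l % n + 1 := by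
      rw [Int.ediv_emod_unique hn']; omega
    simp [this.1, this.2]

lemma go_eq (n : Int) (hn : 1 ≤ n) :
    ∀ (m : Nat) (l : Int),
      solutionGo n m (PySem.Int.floordiv l n) (PySem.Int.mod l n)
        = (PySem.List.pyRange l (l + m) 1).map (pvF n) := by
  intro m
  induction m with
  | zero =>
      intro l
      simp [solutionGo, PySem.List.pyRange_one_eq_nil (le_refl l)]
  | succ m ih =>
      intro l
      have hlt : l < l + (m + 1 : Nat) := by push_cast; omega
      rw [PySem.List.pyRange_one_cons hlt, List.map_cons]
      have harg : l + ((m + 1 : Nat) : Int) = (l + 1) + (m : Nat) := by push_cast; ring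
      rw [harg]
      have hstep := step_eq n l hn
      simp only [solutionGo]
      congr 1
      · simp only [pvF]; omega
      · split_ifs with h
        · have h1 : PySem.Int.floordiv l n + 1 = PySem.Int.floordiv (l + 1) n := by
            simpa [h] using congrArg Prod.fst hstep
          have h2 : (0 : Int) = PySem.Int.mod (l + 1) n := by
            simpa [h] using congrArg Prod.snd hstep
          rw [h1, h2, ih (l + 1)]
        · have h1 : PySem.Int.floordiv l n = PySem.Int.floordiv (l + 1) n := by
            simpa [h] using congrArg Prod.fst hstep
          have h2 : PySem.Int.mod l n + 1 = PySem.Int.mod (l + 1) n := by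
            simpa [h] using congrArg Prod.snd hstep
          rw [h1, h2, ih (l + 1)]

-- pvF on row i, column j (0 ≤ j < n) is max i j + 1.
lemma pvF_row (n i j : Int) (hn : 1 ≤ n) (hj0 : 0 ≤ j) (hjn : j < n) :
    pvF n (i * n + j) = max i j + 1 := by
  have hn' : (0 : Int) < n := hn
  unfold pvF
  rw [PySem.Int.floordiv_eq_ediv_of_pos hn', PySem.Int.mod_eq_emod_of_pos hn']
  have hdiv : (i * n + j) / n = i := by
    rw [show i * n + j = j + i * n by ring, Int.add_mul_ediv_right _ _ (by omega : n ≠ 0),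
        Int.ediv_eq_zero_of_lt hj0 hjn]; ring
  have hmod : (i * n + j) % n = j := by
    rw [show i * n + j = j + n * i by ring, Int.add_mul_emod_self_left,
        Int.emod_eq_of_lt hj0 hjn]
  rw [hdiv, hmod]

-- map f over an arithmetic range where f is constant.
lemma map_const_on_range (f : Int → Int) (c : Int) :
    ∀ (m : Nat) (a : Int), (∀ k, a ≤ k → k < a + m → f k = c) →
      (PySem.List.pyRange a (a + m) 1).map f = List.replicate m c := by
  intro m
  induction m with
  | zero => intro a _; simp [PySem.List.pyRange_one_eq_nil (by omega : a + (0:Nat) ≤ a)]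
  | succ m ih =>
      intro a h
      have hlt : a < a + ((m + 1 : Nat) : Int) := by push_cast; omega
      rw [PySem.List.pyRange_one_cons hlt, List.map_cons,
          h a le_rfl hlt,
          show a + ((m + 1 : Nat) : Int) = (a + 1) + (m : Nat) by push_cast; ring,
          ih (a + 1) (fun k hk1 hk2 => h k (by omega) (by push_cast at hk2 ⊢; omega))]
      rfl

-- map f over an arithmetic range where f is a shift (f k = k + c).
lemma map_shift_on_range (f : Int → Int) (c : Int) :
    ∀ (m : Nat) (a : Int), (∀ k, a ≤ k → k < a + m → f k = k + c) →
      (PySem.List.pyRange a (a + m) 1).map f = PySem.List.pyRange (a + c) (a + m + c) 1 := by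
  intro m
  induction m with
  | zero =>
      intro a _
      simp [PySem.List.pyRange_one_eq_nil (by omega : a + (0:Nat) ≤ a),
            PySem.List.pyRange_one_eq_nil (by omega : a + (0:Nat) + c ≤ a + c)]
  | succ m ih =>
      intro a h
      have hlt : a < a + ((m + 1 : Nat) : Int) := by push_cast; omega
      have hlt' : a + c < a + ((m + 1 : Nat) : Int) + c := by push_cast; omega
      rw [PySem.List.pyRange_one_cons hlt, List.map_cons, h a le_rfl hlt,
          PySem.List.pyRange_one_cons hlt',
          show a + ((m + 1 : Nat) : Int) = (a + 1) + (m : Nat) by push_cast; ring,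
          ih (a + 1) (fun k hk1 hk2 => h k (by omega) (by push_cast at hk2 ⊢; omega))]
      have h1 : a + 1 + c = a + c + 1 := by ring
      have h2 : (a + 1) + (m : Nat) + c = a + ((m+1 : Nat) : Int) + c := by push_cast; ring
      rw [h1, h2]

-- A row segment equals the flat map of pvF over its index window.
lemma rowSeg_eq (n i lo hi : Int) (hn : 1 ≤ n) (hlo : 0 ≤ lo) (hhi : hi < n) :
    rowSeg i lo hi = (PySem.List.pyRange (i * n + lo) (i * n + hi + 1) 1).map (pvF n) := by
  unfold rowSeg
  by_cases hwin : hi < lo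
  · rw [if_neg (by omega : ¬ lo ≤ min hi i),
        PySem.List.pyRange_one_eq_nil (by omega : hi + 2 ≤ max lo (i + 1) + 1),
        PySem.List.pyRange_one_eq_nil (by omega : i * n + hi + 1 ≤ i * n + lo)]
    simp
  · push_neg at hwin
    by_cases hcase : hi ≤ i
    · -- all flat
      have hmin : min hi i = hi := by omega
      have hm : i * n + hi + 1 = (i * n + lo) + ((hi - lo + 1).toNat : Int) := by omega
      rw [if_pos (by omega), hmin, PySem.List.pyRepeat_singleton,
          PySem.List.pyRange_one_eq_nil (by omega : hi + 2 ≤ max lo (i + 1) + 1), hm,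
          map_const_on_range (pvF n) (i + 1) _ _ (fun k hk1 hk2 => by
            have hk := pvF_row n i (k - i * n) hn (by omega) (by omega)
            rw [show i * n + (k - i * n) = k by ring] at hk
            rw [hk]; push_cast at hk2; omega)]
      simp
    · push_neg at hcase
      by_cases hcase2 : i < lo
      · -- all run
        have hmax : max lo (i + 1) = lo := by omega
        have hm : i * n + hi + 1 = (i * n + lo) + ((hi - lo + 1).toNat : Int) := by omega
        rw [if_neg (by omega : ¬ lo ≤ min hi i), hmax, hm,
            map_shift_on_range (pvF n) (1 - i * n) _ _ (fun k hk1 hk2 => by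
              have hk := pvF_row n i (k - i * n) hn (by omega) (by push_cast at hk2; omega)
              rw [show i * n + (k - i * n) = k by ring] at hk
              rw [hk]; push_cast at hk2; omega)]
        have e1 : i * n + lo + (1 - i * n) = lo + 1 := by ring
        have e2 : i * n + lo + ((hi - lo + 1).toNat : Int) + (1 - i * n) = hi + 2 := by omega
        rw [e1, e2]; simp
      · -- lo ≤ i < hi: split at column i+1
        push_neg at hcase2
        rw [PySem.List.pyRange_one_append (i * n + lo) (i * n + i + 1) (i * n + hi + 1)
              (by omega) (by omega), List.map_append]
        have hmin : min hi i = i := by omega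
        have hmax : max lo (i + 1) = i + 1 := by omega
        rw [if_pos (by omega), hmin, hmax, PySem.List.pyRepeat_singleton]
        congr 1
        · have hm : i * n + i + 1 = (i * n + lo) + ((i - lo + 1).toNat : Int) := by omega
          rw [hm, map_const_on_range (pvF n) (i + 1) _ _ (fun k hk1 hk2 => by
                have hk := pvF_row n i (k - i * n) hn (by omega) (by push_cast at hk2; omega)
                rw [show i * n + (k - i * n) = k by ring] at hk
                rw [hk]; push_cast at hk2; omega)]
        · have hm : i * n + hi + 1 = (i * n + i + 1) + ((hi - i).toNat : Int) := by omega
          rw [hm, map_shift_on_range (pvF n) (1 - i * n) _ _ (fun k hk1 hk2 => by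
                have hk := pvF_row n i (k - i * n) hn (by omega) (by push_cast at hk2; omega)
                rw [show i * n + (k - i * n) = k by ring] at hk
                rw [hk]; push_cast at hk2; omega)]
          have e1 : i * n + i + 1 + (1 - i * n) = i + 2 := by ring
          have e2 : i * n + i + 1 + ((hi - i).toNat : Int) + (1 - i * n) = hi + 2 := by omega
          rw [e1, e2, show i + 1 + 1 = i + 2 by ring]

lemma flatMap_congr' {α β : Type} {l : List α} {f g : α → List β}
    (h : ∀ x ∈ l, f x = g x) : l.flatMap f = l.flatMap g := by
  induction l with
  | nil => rfl
  | cons a l ih =>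
      simp only [List.flatMap_cons, h a (by simp), ih (fun x hx => h x (by simp [hx]))]

-- Rows first..last, windowed at both ends, flat-map to the full index range.
lemma rows_eq (n : Int) (hn : 1 ≤ n) :
    ∀ (m : Nat) (l r : Int), l ≤ r →
      PySem.Int.floordiv r n = PySem.Int.floordiv l n + m →
      ((PySem.List.pyRange (PySem.Int.floordiv l n) (PySem.Int.floordiv r n + 1) 1).flatMap
        (fun i => rowSeg i
          (if i = PySem.Int.floordiv l n then PySem.Int.mod l n else 0)
          (if i = PySem.Int.floordiv r n then PySem.Int.mod r n else n - 1)))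
        = (PySem.List.pyRange l (r + 1) 1).map (pvF n) := by
  have hn' : (0 : Int) < n := hn
  intro m
  induction m with
  | zero =>
      intro l r hlr hdiv
      simp only [Nat.cast_zero, add_zero] at hdiv
      rw [hdiv,
          PySem.List.pyRange_one_cons (by omega : PySem.Int.floordiv l n < PySem.Int.floordiv l n + 1),
          PySem.List.pyRange_one_eq_nil (le_refl (PySem.Int.floordiv l n + 1))]
      simp only [List.flatMap_cons, List.flatMap_nil, List.append_nil, if_true]
      have hq : r / n = l / n := by
        rw [PySem.Int.floordiv_eq_ediv_of_pos hn', PySem.Int.floordiv_eq_ediv_of_pos hn'] at hdiv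
        exact hdiv
      rw [PySem.Int.floordiv_eq_ediv_of_pos hn', PySem.Int.mod_eq_emod_of_pos hn',
          PySem.Int.mod_eq_emod_of_pos hn',
          rowSeg_eq n (l / n) (l % n) (r % n) hn (Int.emod_nonneg l (by omega))
            (Int.emod_lt_of_pos r hn')]
      have hid : n * (l / n) + l % n = l := Int.ediv_add_emod l n
      have hidr : n * (r / n) + r % n = r := Int.ediv_add_emod r n
      have e1 : l / n * n + l % n = l := by rw [mul_comm]; omega
      have e2 : l / n * n + r % n + 1 = r + 1 := by rw [mul_comm, ← hq]; omega
      rw [e1, e2]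
  | succ m ih =>
      intro l r hlr hdiv
      set fl := PySem.Int.floordiv l n with hfl
      set fr := PySem.Int.floordiv r n with hfr
      have hflr : fl < fr := by omega
      rw [PySem.List.pyRange_one_cons (by omega : fl < fr + 1)]
      simp only [List.flatMap_cons, if_true]
      have hql : n * (fl) + PySem.Int.mod l n = l := by
        rw [hfl, PySem.Int.floordiv_eq_ediv_of_pos hn', PySem.Int.mod_eq_emod_of_pos hn']
        exact Int.ediv_add_emod l n
      have h0 : 0 ≤ PySem.Int.mod l n := by
        rw [PySem.Int.mod_eq_emod_of_pos hn']; exact Int.emod_nonneg l (by omega)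
      have h1 : PySem.Int.mod l n < n := by
        rw [PySem.Int.mod_eq_emod_of_pos hn']; exact Int.emod_lt_of_pos l hn'
      rw [if_neg (show ¬ fl = fr by omega),
          rowSeg_eq n fl (PySem.Int.mod l n) (n - 1) hn h0 (by omega)]
      -- the remaining rows are exactly the rows of left' = (fl+1)*n
      have hl' : PySem.Int.floordiv ((fl + 1) * n) n = fl + 1 := by
        rw [PySem.Int.floordiv_eq_ediv_of_pos hn', Int.mul_ediv_cancel _ (by omega : n ≠ 0)]
      have hm' : PySem.Int.mod ((fl + 1) * n) n = 0 := by
        rw [PySem.Int.mod_eq_emod_of_pos hn', Int.mul_emod_left]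
      have hrge : (fl + 1) * n ≤ r := by
        have hd2 : r / n = fl + ((m : Int) + 1) := by
          have hcopy : PySem.Int.floordiv r n = fl + ((m : Int) + 1) := by
            rw [← hfr]; push_cast at hdiv ⊢; omega
          rw [PySem.Int.floordiv_eq_ediv_of_pos hn'] at hcopy
          exact hcopy
        exact (Int.le_ediv_iff_mul_le hn').mp (by omega)
      have hdiv' : fr = PySem.Int.floordiv ((fl + 1) * n) n + m := by
        rw [hl']; push_cast at hdiv ⊢; omega
      have hrest := ih ((fl + 1) * n) r hrge (by rw [← hfr]; exact hdiv')
      rw [hl', hm'] at hrest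
      have hcongr : (PySem.List.pyRange (fl + 1) (fr + 1) 1).flatMap
          (fun i => rowSeg i (if i = fl then PySem.Int.mod l n else 0)
            (if i = fr then PySem.Int.mod r n else n - 1))
          = (PySem.List.pyRange (fl + 1) (fr + 1) 1).flatMap
          (fun i => rowSeg i (if i = fl + 1 then (0:Int) else 0)
            (if i = fr then PySem.Int.mod r n else n - 1)) := by
        apply flatMap_congr'
        intro x hx
        rw [PySem.List.mem_pyRange_one] at hx
        rw [if_neg (by omega : ¬ x = fl)]
        split_ifs <;> rfl
      have hexp : (fl + 1) * n = n * fl + n := by ring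
      rw [hcongr, hrest,
          PySem.List.pyRange_one_append l ((fl + 1) * n) (r + 1) (by omega) (by omega),
          List.map_append]
      congr 1
      have e1 : fl * n + PySem.Int.mod l n = l := by rw [mul_comm]; omega
      have e2 : fl * n + (n - 1) + 1 = (fl + 1) * n := by ring
      rw [e1, e2]

-- B's fold as a flatMap over the rows.
lemma alt_eq_flatMap (n l r : Int) :
    solution_alt n l r
      = (PySem.List.pyRange (PySem.Int.floordiv l n) (PySem.Int.floordiv r n + 1) 1).flatMap
          (fun i => rowSeg i
            (if i = PySem.Int.floordiv l n then PySem.Int.mod l n else 0)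
            (if i = PySem.Int.floordiv r n then PySem.Int.mod r n else n - 1)) := by
  unfold solution_alt
  rw [PySem.List.foldl_append_eq_flatMap]
  simp

-- ===== VERDICT (by name: the statement is the Claim_ definition above) =====
theorem solution_spec : Claim_equal_solution := by
  intro n left right _ hpre
  have hn' : (0 : Int) < n := hpre
  unfold Spec_solution
  rw [alt_eq_flatMap]
  by_cases hle : left ≤ right
  · have hdle : PySem.Int.floordiv left n ≤ PySem.Int.floordiv right n := by
      rw [PySem.Int.floordiv_eq_ediv_of_pos hn', PySem.Int.floordiv_eq_ediv_of_pos hn']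
      exact Int.ediv_le_ediv hn' hle
    obtain ⟨m, hm⟩ : ∃ m : Nat, PySem.Int.floordiv right n = PySem.Int.floordiv left n + m :=
      ⟨(PySem.Int.floordiv right n - PySem.Int.floordiv left n).toNat, by omega⟩
    rw [rows_eq n hpre m left right hle hm]
    unfold solution
    have harg : left + ((right - left + 1).toNat : Int) = right + 1 := by omega
    rw [go_eq n hpre _ left, harg]
  · -- left > right: both sides are []
    push_neg at hle
    unfold solution
    have h0 : (right - left + 1).toNat = 0 := by omega
    rw [h0]
    have hdge : PySem.Int.floordiv right n ≤ PySem.Int.floordiv left n := by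
      rw [PySem.Int.floordiv_eq_ediv_of_pos hn', PySem.Int.floordiv_eq_ediv_of_pos hn']
      exact Int.ediv_le_ediv hn' (by omega)
    by_cases heq : PySem.Int.floordiv right n = PySem.Int.floordiv left n
    · -- one row, empty window
      rw [heq, PySem.List.pyRange_one_cons (by omega),
          PySem.List.pyRange_one_eq_nil (le_refl _)]
      simp only [List.flatMap_cons, List.flatMap_nil, List.append_nil, solutionGo, if_true]
      have heq' : right / n = left / n := by
        rw [PySem.Int.floordiv_eq_ediv_of_pos hn', PySem.Int.floordiv_eq_ediv_of_pos hn'] at heq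
        exact heq
      have hlm : PySem.Int.mod right n < PySem.Int.mod left n := by
        rw [PySem.Int.mod_eq_emod_of_pos hn', PySem.Int.mod_eq_emod_of_pos hn']
        have h1 := Int.ediv_add_emod left n
        have h2 := Int.ediv_add_emod right n
        rw [heq'] at h2
        omega
      unfold rowSeg
      rw [if_neg (by omega), PySem.List.pyRange_one_eq_nil (by omega)]
      simp
    · -- no rows at all
      rw [PySem.List.pyRange_one_eq_nil (by omega)]
      rfl
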